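-- pv_equiv track=rewrite | github.com/tteggu87/repo-docs-ontology-skills | scripts/workbench/common.py | append_bullet_to_section
-- ===== SOURCE A (Python) =====
-- def append_bullet_to_section(text: str, heading: str, bullet: str) -> str:
--     normalized = text if text.endswith("\n") else text + "\n"
--     if bullet in normalized:
--         return normalized
--
--     lines = normalized.splitlines()
--     section_header = f"## {heading}"
--     try:
--         start_index = lines.index(section_header)
--     except ValueError:
--         return normalized.rstrip() + f"\n\n## {heading}\n\n{bullet}\n"
--
--     insert_at = len(lines)
--     for index in range(start_index + 1, len(lines)):
--         if lines[index].startswith("## "):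
--             insert_at = index
--             break
--
--     insertion = [bullet]
--     if insert_at > 0 and lines[insert_at - 1] != "":
--         insertion.insert(0, "")
--     updated_lines = lines[:insert_at] + insertion + lines[insert_at:]
--     return "\n".join(updated_lines).rstrip() + "\n"
-- ===== SOURCE B (Python) =====
-- def append_bullet_to_section(text: str, heading: str, bullet: str) -> str:
--     normalized = text if text.endswith("\n") else text + "\n"
--     if bullet in normalized:
--         return normalized
--
--     header = f"## {heading}"
--     # group lines into blocks: a block starts at each line beginning with "## ";
--     # lines before the first heading form a preamble block
--     blocks = []
--     current = []
--     for line in normalized.splitlines():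
--         if line.startswith("## "):
--             blocks.append(current)
--             current = [line]
--         else:
--             current.append(line)
--     blocks.append(current)
--
--     out = []
--     found = False
--     for blk in blocks:
--         if not found and blk and blk[0] == header:
--             found = True
--             if blk[-1] != "":
--                 blk = blk + [""]
--             blk = blk + [bullet]
--         out.extend(blk)
--
--     if not found:
--         return normalized.rstrip() + f"\n\n## {heading}\n\n{bullet}\n"
--     return "\n".join(out).rstrip() + "\n"
-- ===== Notes on version B (the rewrite author's own statement) =====
-- stated objective: alternative
-- what changed: Replaces the index/forward-scan/slice splice with a single grouping pass into heading-delimited blocks: the bullet is appended to the matching block (with its blank-line rule) and the blocks are flattened back.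
import Mathlib
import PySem

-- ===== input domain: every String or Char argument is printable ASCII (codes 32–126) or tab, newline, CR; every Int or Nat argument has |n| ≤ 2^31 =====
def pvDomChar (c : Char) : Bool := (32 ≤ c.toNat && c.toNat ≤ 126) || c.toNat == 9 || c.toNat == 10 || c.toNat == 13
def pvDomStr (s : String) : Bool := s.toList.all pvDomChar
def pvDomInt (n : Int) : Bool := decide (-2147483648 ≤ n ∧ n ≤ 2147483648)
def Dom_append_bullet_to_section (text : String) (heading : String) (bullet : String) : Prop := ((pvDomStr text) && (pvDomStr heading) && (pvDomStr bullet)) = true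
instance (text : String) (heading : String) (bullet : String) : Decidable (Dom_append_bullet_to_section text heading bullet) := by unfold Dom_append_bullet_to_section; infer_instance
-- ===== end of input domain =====

-- B restructures A (same return value, no side effects): instead of lines.index + forward
-- scan + slice splice, B groups the lines into "## "-delimited blocks, appends the bullet
-- to the matching block (with the same blank-line rule), and flattens the blocks back.

-- ===== PORT A =====
-- for index in range(start_index+1, len(lines)): if lines[index].startswith("## "): insert_at = index; break
def pvA_findNext (lines : List String) (i : Nat) : Nat :=
  if h : i < lines.length then
    if PySem.Str.startswith lines[i] "## " then i else pvA_findNext lines (i + 1)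
  else lines.length
termination_by lines.length - i

def append_bullet_to_section (text : String) (heading : String) (bullet : String) : String :=
  let normalized := if PySem.Str.endswith text "\n" then text else text ++ "\n"
  if PySem.Str.isIn bullet normalized then normalized
  else
    let lines := PySem.Str.splitlines normalized
    match PySem.List.index? lines ("## " ++ heading) with
    | none => PySem.Str.rstrip normalized ++ "\n\n## " ++ heading ++ "\n\n" ++ bullet ++ "\n"
    | some startIndex =>
      let insertAt := pvA_findNext lines (startIndex + 1)
      let insertion :=
        if insertAt > 0 && (PySem.List.pyGet? lines ((insertAt : Int) - 1) != some "") then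
          ["", bullet]
        else [bullet]
      PySem.Str.rstrip (PySem.Str.join "\n"
        (PySem.List.slice lines none (some (insertAt : Int)) ++ insertion ++
         PySem.List.slice lines (some (insertAt : Int)) none)) ++ "\n"

-- ===== PORT B =====
-- the grouping loop: for line in lines: if line.startswith("## "): blocks.append(current); current = [line] else: current.append(line)
def pvB_step (acc : List (List String) × List String) (line : String) : List (List String) × List String :=
  if PySem.Str.startswith line "## " then (acc.1 ++ [acc.2], [line]) else (acc.1, acc.2 ++ [line])

-- the output loop over blocks, carrying (out, found)
def pvB_out (header bullet : String) (acc : List String × Bool) (blk : List String) : List String × Bool :=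
  if !acc.2 && (decide (blk ≠ []) && (blk.head? == some header)) then
    let blk2 := if blk.getLast? != some "" then blk ++ [""] else blk
    (acc.1 ++ (blk2 ++ [bullet]), true)
  else (acc.1 ++ blk, acc.2)

def append_bullet_to_section_alt (text : String) (heading : String) (bullet : String) : String :=
  let normalized := if PySem.Str.endswith text "\n" then text else text ++ "\n"
  if PySem.Str.isIn bullet normalized then normalized
  else
    let p := (PySem.Str.splitlines normalized).foldl pvB_step ([], [])
    let q := (p.1 ++ [p.2]).foldl (pvB_out ("## " ++ heading) bullet) ([], false)
    if q.2 then PySem.Str.rstrip (PySem.Str.join "\n" q.1) ++ "\n"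
    else PySem.Str.rstrip normalized ++ "\n\n## " ++ heading ++ "\n\n" ++ bullet ++ "\n"

-- ===== PRECONDITION & SPEC =====
def Spec_append_bullet_to_section (text : String) (heading : String) (bullet : String) (out : String) : Prop := out = append_bullet_to_section_alt text heading bullet
instance (text : String) (heading : String) (bullet : String) (out : String) : Decidable (Spec_append_bullet_to_section text heading bullet out) := by unfold Spec_append_bullet_to_section; infer_instance

-- ===== CLAIM (what is proved, stated in full; the proofs are below) =====
def Claim_equal_append_bullet_to_section : Prop := ∀ (text : String) (heading : String) (bullet : String), Dom_append_bullet_to_section text heading bullet → Spec_append_bullet_to_section text heading bullet (append_bullet_to_section text heading bullet)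

-- ===== LEMMAS AND PROOFS =====
def pvPad (prev : String) : List String := if prev ≠ "" then [""] else []

def pvIns (bullet : String) (prev : String) : List String → List String
  | [] => pvPad prev ++ [bullet]
  | l :: ls =>
    if PySem.Str.startswith l "## " then pvPad prev ++ [bullet] ++ l :: ls
    else l :: pvIns bullet l ls

def pvFind (header bullet : String) : List String → Option (List String)
  | [] => none
  | l :: ls =>
    if l = header then some (l :: pvIns bullet l ls)
    else (pvFind header bullet ls).map (l :: ·)

def pvNf : List String → Nat
  | [] => 0
  | l :: ls => if PySem.Str.startswith l "## " then 0 else pvNf ls + 1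

theorem pvSw (l : String) : PySem.Str.startswith l "## " = PySem.Chars.startswith l.toList ['#', '#', ' '] := rfl

theorem pvNf_le (ls : List String) : pvNf ls ≤ ls.length := by
  induction ls with
  | nil => simp [pvNf]
  | cons l ls ih =>
    simp only [pvNf]
    split
    · simp
    · simp only [List.length_cons]; omega

theorem pvGetLastD_ne (cur : List String) (d : String) (hc : cur ≠ [])
    (hl : cur.getLast? ≠ some "") : cur.getLast?.getD d ≠ "" := by
  cases hcur : cur.getLast? with
  | none => exact absurd (List.getLast?_eq_none_iff.mp hcur) hc
  | some v =>
    intro hv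
    simp only [Option.getD_some] at hv
    exact hl (hv ▸ hcur)

theorem pvHead?_append (cur : List String) (l : String) (hc : cur ≠ []) :
    (cur ++ [l]).head? = cur.head? := by
  cases cur with
  | nil => exact absurd rfl hc
  | cons a t => rfl

theorem pvIns_eq_splice (bullet : String) (ls : List String) (prev : String) :
    pvIns bullet prev ls =
      ls.take (pvNf ls) ++ pvPad ((ls.take (pvNf ls)).getLast?.getD prev) ++ [bullet] ++ ls.drop (pvNf ls) := by
  induction ls generalizing prev with
  | nil => simp [pvIns, pvNf]
  | cons l ls ih =>
    by_cases h : PySem.Chars.startswith l.toList ['#', '#', ' '] = true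
    · simp only [pvIns, pvNf, pvSw, h, if_true]
      simp
    · simp only [pvIns, pvNf, pvSw, h, Bool.false_eq_true, if_false]
      rw [ih l]
      simp only [List.take_succ_cons, List.drop_succ_cons]
      have : (l :: ls.take (pvNf ls)).getLast?.getD prev = (ls.take (pvNf ls)).getLast?.getD l := by
        rw [← List.getLastD_eq_getLast?, ← List.getLastD_eq_getLast?, List.getLastD_cons]
      rw [this]
      simp

theorem pvFind_eq_none (header bullet : String) (ls : List String) :
    pvFind header bullet ls = none ↔ header ∉ ls := by
  induction ls with
  | nil => simp [pvFind]
  | cons l ls ih =>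
    simp only [pvFind]
    by_cases h : l = header
    · simp [h]
    · rw [if_neg h]
      simp only [Option.map_eq_none_iff, ih, List.mem_cons, not_or]
      constructor
      · intro hn; exact ⟨fun hx => h hx.symm, hn⟩
      · intro hn; exact hn.2

theorem pvFind_append (header bullet : String) (pre suf : List String)
    (hpre : header ∉ pre) :
    pvFind header bullet (pre ++ header :: suf) = some (pre ++ header :: pvIns bullet header suf) := by
  induction pre with
  | nil => simp [pvFind]
  | cons p pre ih =>
    simp only [List.cons_append, pvFind]
    have hp : p ≠ header := fun h => hpre (h ▸ List.mem_cons_self)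
    rw [if_neg hp, ih (fun h => hpre (List.mem_cons_of_mem _ h))]
    simp

theorem pvA_findNext_spec (lines : List String) :
    ∀ rest pre : List String, lines = pre ++ rest →
      pvA_findNext lines pre.length = pre.length + pvNf rest := by
  intro rest
  induction rest with
  | nil =>
    intro pre hp
    rw [pvA_findNext]
    simp [hp, pvNf]
  | cons r rs ih =>
    intro pre hp
    rw [pvA_findNext]
    have hlen : pre.length < lines.length := by simp [hp]
    have hget : lines[pre.length]'hlen = r := by
      simp [hp, List.getElem_append_right (Nat.le_refl pre.length)]
    rw [dif_pos hlen, hget, pvSw]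
    by_cases hr : PySem.Chars.startswith r.toList ['#', '#', ' '] = true
    · rw [if_pos hr]; simp [pvNf, pvSw, hr]
    · rw [if_neg hr]
      have := ih (pre ++ [r]) (by simp [hp])
      simp at this
      simp only [pvNf, pvSw, hr, Bool.false_eq_true, if_false]
      omega

theorem pvGetLastD_take_eq : ∀ (t : List String) (k : Nat) (d : String), k ≤ t.length →
    (t.take k).getLast?.getD d = (d :: t)[k]?.getD d
  | _, 0, d, _ => by simp
  | [], k+1, d, hk => by simp at hk
  | x :: xs, k+1, d, hk => by
    have hk' : k ≤ xs.length := by simpa using hk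
    have h1 : ((x :: xs).take (k+1)).getLast?.getD d = (xs.take k).getLast?.getD x := by
      rw [List.take_succ_cons, ← List.getLastD_eq_getLast?, List.getLastD_cons, List.getLastD_eq_getLast?]
    rw [h1, pvGetLastD_take_eq xs k x hk']
    have h2 : (x :: xs)[k]? = some ((x :: xs)[k]'(by simp; omega)) := List.getElem?_eq_getElem _
    have h3 : (d :: x :: xs)[k+1]? = some ((x :: xs)[k]'(by simp; omega)) := by
      rw [List.getElem?_cons_succ, h2]
    rw [h3, h2]
    simp

theorem pvA_eq_pvFind (heading bullet : String) (lines : List String) :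
    (match PySem.List.index? lines ("## " ++ heading) with
      | none => (none : Option (List String))
      | some startIndex =>
        let insertAt := pvA_findNext lines (startIndex + 1)
        let insertion :=
          if insertAt > 0 && (PySem.List.pyGet? lines ((insertAt : Int) - 1) != some "") then
            ["", bullet]
          else [bullet]
        some (PySem.List.slice lines none (some (insertAt : Int)) ++ insertion ++
              PySem.List.slice lines (some (insertAt : Int)) none)) =
    pvFind ("## " ++ heading) bullet lines := by
  cases hix : PySem.List.index? lines ("## " ++ heading) with
  | none =>
    rw [PySem.List.index?_eq_idxOf?] at hix
    have hnm : ("## " ++ heading) ∉ lines := by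
      have := List.idxOf?_eq_none_iff.mp hix
      simpa using this
    simp [(pvFind_eq_none ("## " ++ heading) bullet lines).mpr hnm]
  | some s =>
    obtain ⟨pre, suf, hsplit, hlen, hnotin⟩ := (PySem.List.index?_eq_some_iff lines ("## " ++ heading) s).mp hix
    subst hsplit
    rw [pvFind_append ("## " ++ heading) bullet pre suf hnotin]
    have hfn : pvA_findNext (pre ++ ("## " ++ heading) :: suf) (s + 1) = s + 1 + pvNf suf := by
      have := pvA_findNext_spec (pre ++ ("## " ++ heading) :: suf) suf (pre ++ [("## " ++ heading)]) (by simp)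
      simpa [hlen] using this
    simp only [hfn]
    have hnfle := pvNf_le suf
    have harith : s + 1 + pvNf suf = pre.length + (pvNf suf + 1) := by omega
    have htake : PySem.List.slice (pre ++ ("## " ++ heading) :: suf) none (some ((s + 1 + pvNf suf : Nat) : Int)) =
        pre ++ ("## " ++ heading) :: suf.take (pvNf suf) := by
      rw [PySem.List.slice_to_natCast, harith, List.take_length_add_append, List.take_succ_cons]
    have hdrop : PySem.List.slice (pre ++ ("## " ++ heading) :: suf) (some ((s + 1 + pvNf suf : Nat) : Int)) none =
        suf.drop (pvNf suf) := by
      rw [PySem.List.slice_from_natCast, harith, List.drop_length_add_append, List.drop_succ_cons]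
    have hcast : ((s + 1 + pvNf suf : Nat) : Int) - 1 = ((s + pvNf suf : Nat) : Int) := by push_cast; ring
    have hget : PySem.List.pyGet? (pre ++ ("## " ++ heading) :: suf) (((s + 1 + pvNf suf : Nat) : Int) - 1) =
        some ((("## " ++ heading) :: suf)[pvNf suf]?.getD ("## " ++ heading)) := by
      rw [hcast, PySem.List.pyGet?_natCast]
      rw [List.getElem?_append_right (by omega), ← hlen, Nat.add_sub_cancel_left]
      rw [List.getElem?_eq_getElem (l := ("## " ++ heading) :: suf) (by simp; omega)]
      simp
    have hpos : s + 1 + pvNf suf > 0 := by omega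
    have hlast : (suf.take (pvNf suf)).getLast?.getD ("## " ++ heading) = (("## " ++ heading) :: suf)[pvNf suf]?.getD ("## " ++ heading) :=
      pvGetLastD_take_eq suf (pvNf suf) ("## " ++ heading) hnfle
    rw [htake, hdrop, hget, pvIns_eq_splice, hlast]
    by_cases hne : (("## " ++ heading) :: suf)[pvNf suf]?.getD ("## " ++ heading) = ""
    · simp [hne, pvPad, hpos]
    · simp [hne, pvPad, hpos]
def pvBlocksAux (cur : List String) : List String → List (List String)
  | [] => [cur]
  | l :: ls =>
    if PySem.Str.startswith l "## " then cur :: pvBlocksAux [l] ls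
    else pvBlocksAux (cur ++ [l]) ls

theorem pvB_foldl_step (ls : List String) :
    ∀ (bs : List (List String)) (cur : List String),
      (ls.foldl pvB_step (bs, cur)).1 ++ [(ls.foldl pvB_step (bs, cur)).2] = bs ++ pvBlocksAux cur ls := by
  induction ls with
  | nil => intro bs cur; simp [pvBlocksAux]
  | cons l ls ih =>
    intro bs cur
    simp only [List.foldl_cons, pvB_step, pvBlocksAux]
    by_cases h : PySem.Chars.startswith l.toList ['#', '#', ' '] = true
    · simp only [pvSw, h, if_true]
      rw [ih]
      simp
    · simp only [pvSw, h, Bool.false_eq_true, if_false]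
      rw [ih]

theorem pvBlocksAux_flatten (ls : List String) :
    ∀ cur, (pvBlocksAux cur ls).flatten = cur ++ ls := by
  induction ls with
  | nil => intro cur; simp [pvBlocksAux]
  | cons l ls ih =>
    intro cur
    simp only [pvBlocksAux]
    by_cases h : PySem.Chars.startswith l.toList ['#', '#', ' '] = true
    · simp only [pvSw, h, if_true]
      simp [ih]
    · simp only [pvSw, h, Bool.false_eq_true, if_false]
      simp [ih]

theorem pvB_out_found (header bullet : String) (blks : List (List String)) :
    ∀ out, blks.foldl (pvB_out header bullet) (out, true) = (out ++ blks.flatten, true) := by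
  induction blks with
  | nil => intro out; simp
  | cons b bs ih => intro out; simp [pvB_out, ih]

theorem pvB_out_in_section (header bullet : String) (ls : List String) :
    ∀ (cur : List String) (out : List String), cur ≠ [] → cur.head? = some header →
      (pvBlocksAux cur ls).foldl (pvB_out header bullet) (out, false) =
        (out ++ (cur ++ ls.take (pvNf ls)) ++ pvPad ((cur ++ ls.take (pvNf ls)).getLast?.getD header) ++ [bullet] ++ ls.drop (pvNf ls), true) := by
  induction ls with
  | nil =>
    intro cur out hc hhd
    simp only [pvBlocksAux, List.foldl_cons, List.foldl_nil, pvB_out]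
    rw [if_pos (by simp [hc, hhd])]
    by_cases hl : cur.getLast? = some ""
    · have hgl : cur.getLast?.getD header = "" := by rw [hl]; rfl
      simp [pvNf, hl, pvPad, hgl]
    · have hgl : cur.getLast?.getD header ≠ "" := pvGetLastD_ne cur header hc hl
      rw [if_pos (by simpa using hl)]
      simp [pvNf, pvPad, hgl]
  | cons l ls ih =>
    intro cur out hc hhd
    simp only [pvBlocksAux]
    by_cases h : PySem.Chars.startswith l.toList ['#', '#', ' '] = true
    · rw [pvSw] at *
      rw [if_pos h]
      simp only [List.foldl_cons, pvB_out]
      rw [if_pos (by simp [hc, hhd])]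
      have hflat := pvBlocksAux_flatten ls [l]
      have hnf : pvNf (l :: ls) = 0 := by simp [pvNf, pvSw, h]
      by_cases hl : cur.getLast? = some ""
      · have hgl : cur.getLast?.getD header = "" := by rw [hl]; rfl
        simp [hl, pvB_out_found, hflat, hnf, pvPad, hgl]
      · have hgl : cur.getLast?.getD header ≠ "" := pvGetLastD_ne cur header hc hl
        rw [if_pos (by simpa using hl)]
        simp [pvB_out_found, hflat, hnf, pvPad, hgl]
    · rw [if_neg (by rw [pvSw]; exact h)]
      rw [ih (cur ++ [l]) out (by simp) (by rw [pvHead?_append cur l hc]; exact hhd)]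
      have hnf : pvNf (l :: ls) = pvNf ls + 1 := by simp [pvNf, pvSw, h]
      rw [hnf]
      simp only [List.take_succ_cons, List.drop_succ_cons]
      have hassoc : cur ++ l :: ls.take (pvNf ls) = (cur ++ [l]) ++ ls.take (pvNf ls) := by simp
      rw [hassoc]

theorem pvB_out_search (header bullet : String)
    (hhsw : PySem.Str.startswith header "## " = true)
    (ls : List String) :
    ∀ (cur : List String) (out : List String), cur.head? ≠ some header →
      (pvBlocksAux cur ls).foldl (pvB_out header bullet) (out, false) =
        (match pvFind header bullet ls with
          | none => (out ++ cur ++ ls, false)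
          | some r => (out ++ cur ++ r, true)) := by
  induction ls with
  | nil =>
    intro cur out hcur
    simp only [pvBlocksAux, List.foldl_cons, List.foldl_nil, pvB_out, pvFind]
    rw [if_neg ?hne]
    · simp
    case hne =>
      intro hcon
      simp only [Bool.not_false, Bool.true_and, Bool.and_eq_true, decide_eq_true_eq, beq_iff_eq] at hcon
      cases cur with
      | nil => exact hcon.1 rfl
      | cons a t => exact hcur (by simpa using congrArg some hcon.2)
  | cons l ls ih =>
    intro cur out hcur
    simp only [pvBlocksAux]
    by_cases h : PySem.Chars.startswith l.toList ['#', '#', ' '] = true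
    · rw [if_pos (by rw [pvSw]; exact h)]
      simp only [List.foldl_cons, pvB_out]
      rw [if_neg ?hne2]
      case hne2 =>
        intro hcon
        simp only [Bool.not_false, Bool.true_and, Bool.and_eq_true, decide_eq_true_eq, beq_iff_eq] at hcon
        cases cur with
        | nil => exact hcon.1 rfl
        | cons a t => exact hcur (by simpa using congrArg some hcon.2)
      by_cases hl : l = header
      · subst hl
        rw [pvB_out_in_section l bullet ls [l] (out ++ cur) (by simp) (by simp)]
        simp only [pvFind, if_pos rfl]
        rw [pvIns_eq_splice]
        have hl2 : ([l] ++ ls.take (pvNf ls)).getLast?.getD l = (ls.take (pvNf ls)).getLast?.getD l := by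
          rw [List.singleton_append, ← List.getLastD_eq_getLast?, List.getLastD_cons, List.getLastD_eq_getLast?]
        rw [hl2]
        simp
      · rw [ih [l] (out ++ cur) (by simpa using hl)]
        simp only [pvFind, if_neg hl]
        cases pvFind header bullet ls with
        | none => simp
        | some r => simp
    · rw [if_neg (by rw [pvSw]; exact h)]
      have hlh : l ≠ header := by
        intro hx
        rw [hx, ← pvSw header] at h
        exact h hhsw
      rw [ih (cur ++ [l]) out ?hcur2]
      case hcur2 =>
        cases cur with
        | nil => simpa using fun hx => hlh hx
        | cons a t => rw [pvHead?_append (a :: t) l (by simp)]; exact hcur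
      simp only [pvFind, if_neg hlh]
      cases pvFind header bullet ls with
      | none => simp
      | some r => simp

theorem pvHeader_startswith (heading : String) :
    PySem.Str.startswith ("## " ++ heading) "## " = true := by
  rw [PySem.Str.startswith_eq, PySem.Chars.startswith_iff]
  simp

-- ===== VERDICT (by name: the statement is the Claim_ definition above) =====
theorem append_bullet_to_section_spec : Claim_equal_append_bullet_to_section := by
  intro text heading bullet _
  unfold Spec_append_bullet_to_section append_bullet_to_section append_bullet_to_section_alt
  set normalized := if PySem.Str.endswith text "\n" then text else text ++ "\n" with hnorm
  by_cases hdup : PySem.Str.isIn bullet normalized = true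
  · simp only [hdup, if_true]
  · have hdup' : PySem.Str.isIn bullet normalized = false := by simpa using hdup
    simp only [hdup', Bool.false_eq_true, if_false]
    set lines := PySem.Str.splitlines normalized with hlines
    have hA := pvA_eq_pvFind heading bullet lines
    have hblocks := pvB_foldl_step lines [] []
    have hB := pvB_out_search ("## " ++ heading) bullet (pvHeader_startswith heading) lines [] [] (by simp)
    have hfold : ((lines.foldl pvB_step ([], [])).1 ++ [(lines.foldl pvB_step ([], [])).2]).foldl
        (pvB_out ("## " ++ heading) bullet) ([], false) =
        (pvBlocksAux [] lines).foldl (pvB_out ("## " ++ heading) bullet) ([], false) := by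
      rw [hblocks]; simp
    rw [hfold, hB]
    cases hfind : pvFind ("## " ++ heading) bullet lines with
    | none =>
      rw [hfind] at hA
      cases hix : PySem.List.index? lines ("## " ++ heading) with
      | none => simp
      | some s => rw [hix] at hA; simp at hA
    | some r =>
      rw [hfind] at hA
      cases hix : PySem.List.index? lines ("## " ++ heading) with
      | none => rw [hix] at hA; simp at hA
      | some s =>
        rw [hix] at hA
        simp at hA
        simp [hA]
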